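-- pv_equiv track=rewrite | github.com/cestpasphoto/alpha-zero-general | akropolis/AkropolisPlayers.py | _compute_level_pyramid
-- ===== SOURCE A (Python) =====
-- def _compute_level_pyramid(leftest_hex, n_tiles):
--     r0, q0 = leftest_hex
--     tiles = []
--     for i in range(n_tiles):
--         if r0 % 2 == 0:
--             tile = {(r0, q0), (r0-1, q0), (r0, q0+1)}
--             r0, q0 = r0-1, q0+1
--         else:
--             tile = {(r0, q0), (r0+1, q0+1), (r0, q0+1)}
--             r0, q0 = r0+1, q0+2
--         tiles.append(tile)
--     return tiles
-- ===== SOURCE B (Python) =====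
-- def _compute_level_pyramid(leftest_hex, n_tiles):
--     r, q = leftest_hex
--     start_even = r % 2 == 0
--
--     def pos(i):
--         k, p = divmod(i, 2)
--         if p == 0:
--             return (r, q + 3 * k)
--         if start_even:
--             return (r - 1, q + 1 + 3 * k)
--         return (r + 1, q + 2 + 3 * k)
--
--     def tile(rr, qq):
--         if rr % 2 == 0:
--             return {(rr, qq), (rr - 1, qq), (rr, qq + 1)}
--         return {(rr, qq), (rr + 1, qq + 1), (rr, qq + 1)}
--
--     return [tile(*pos(i)) for i in range(n_tiles)]
-- ===== Notes on version B (the rewrite author's own statement) =====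
-- stated objective: alternative
-- what changed: Replaces the stateful loop carrying (r0,q0) across iterations with a closed-form index computation: each tile's anchor is derived directly from the start and i via the period-2 pattern, emitted by a comprehension with no carried accumulator.
import Mathlib
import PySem

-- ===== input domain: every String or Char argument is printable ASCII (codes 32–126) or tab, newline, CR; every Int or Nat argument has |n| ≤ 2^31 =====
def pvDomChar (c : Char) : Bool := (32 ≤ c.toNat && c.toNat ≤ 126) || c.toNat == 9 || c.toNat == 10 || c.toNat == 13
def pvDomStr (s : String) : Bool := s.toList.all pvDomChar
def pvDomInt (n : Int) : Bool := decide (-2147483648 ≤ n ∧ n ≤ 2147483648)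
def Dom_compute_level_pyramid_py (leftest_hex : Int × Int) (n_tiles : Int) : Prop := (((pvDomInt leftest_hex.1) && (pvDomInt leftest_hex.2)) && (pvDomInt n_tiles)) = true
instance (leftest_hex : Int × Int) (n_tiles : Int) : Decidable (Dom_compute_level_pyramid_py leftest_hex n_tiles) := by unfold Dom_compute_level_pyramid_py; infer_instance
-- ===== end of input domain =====

-- B replaces A's stateful (r0,q0)-carrying loop with a closed-form per-index anchor computation (same cost; alternative decomposition).

-- ===== PORT A =====
-- literal transliteration of A: fold over range(n_tiles) carrying (r0, q0, tiles)
def compute_level_pyramid_py (leftest_hex : Int × Int) (n_tiles : Int) : List (List (Int × Int)) :=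
  let st := (PySem.List.pyRange 0 n_tiles 1).foldl
    (fun (st : Int × Int × List (List (Int × Int))) _ =>
      if PySem.Int.mod st.1 2 = 0 then
        (st.1 - 1, st.2.1 + 1,
          st.2.2 ++ [PySem.Set.ofList [(st.1, st.2.1), (st.1 - 1, st.2.1), (st.1, st.2.1 + 1)]])
      else
        (st.1 + 1, st.2.1 + 2,
          st.2.2 ++ [PySem.Set.ofList [(st.1, st.2.1), (st.1 + 1, st.2.1 + 1), (st.1, st.2.1 + 1)]]))
    (leftest_hex.1, leftest_hex.2, ([] : List (List (Int × Int))))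
  st.2.2

-- ===== PORT B =====
-- Source B helper pos(i): anchor of tile i, computed directly from the start and i
def pvPos (r q : Int) (startEven : Bool) (i : Int) : Int × Int :=
  let k := PySem.Int.floordiv i 2
  if PySem.Int.mod i 2 = 0 then (r, q + 3 * k)
  else if startEven then (r - 1, q + 1 + 3 * k)
  else (r + 1, q + 2 + 3 * k)

-- Source B helper tile(rr, qq): the tile set anchored at (rr, qq), shape chosen by rr's parity
def pvTile (rr qq : Int) : List (Int × Int) :=
  if PySem.Int.mod rr 2 = 0 then PySem.Set.ofList [(rr, qq), (rr - 1, qq), (rr, qq + 1)]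
  else PySem.Set.ofList [(rr, qq), (rr + 1, qq + 1), (rr, qq + 1)]

def compute_level_pyramid_py_alt (leftest_hex : Int × Int) (n_tiles : Int) : List (List (Int × Int)) :=
  let r := leftest_hex.1
  let q := leftest_hex.2
  let startEven := PySem.Int.mod r 2 == 0
  (PySem.List.pyRange 0 n_tiles 1).map (fun i =>
    let p := pvPos r q startEven i
    pvTile p.1 p.2)

-- ===== PRECONDITION & SPEC =====
def Spec_compute_level_pyramid_py (leftest_hex : Int × Int) (n_tiles : Int) (out : List (List (Int × Int))) : Prop := out = compute_level_pyramid_py_alt leftest_hex n_tiles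
instance (leftest_hex : Int × Int) (n_tiles : Int) (out : List (List (Int × Int))) : Decidable (Spec_compute_level_pyramid_py leftest_hex n_tiles out) := by unfold Spec_compute_level_pyramid_py; infer_instance

-- ===== CLAIM (what is proved, stated in full; the proofs are below) =====
def Claim_equal_compute_level_pyramid_py : Prop := ∀ (leftest_hex : Int × Int) (n_tiles : Int), Dom_compute_level_pyramid_py leftest_hex n_tiles → Spec_compute_level_pyramid_py leftest_hex n_tiles (compute_level_pyramid_py leftest_hex n_tiles)

-- ===== LEMMAS AND PROOFS =====

theorem pvMod2 (x : Int) : PySem.Int.mod x 2 = x % 2 :=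
  PySem.Int.mod_eq_emod_of_pos (by norm_num)

theorem pvFdiv2 (x : Int) : PySem.Int.floordiv x 2 = x / 2 :=
  PySem.Int.floordiv_eq_ediv_of_pos (by norm_num)

-- A's loop as a head-first structural recursion on the iteration count
def pvAuxA (r q : Int) : Nat → List (List (Int × Int))
  | 0 => []
  | n + 1 =>
    if PySem.Int.mod r 2 = 0 then
      PySem.Set.ofList [(r, q), (r - 1, q), (r, q + 1)] :: pvAuxA (r - 1) (q + 1) n
    else
      PySem.Set.ofList [(r, q), (r + 1, q + 1), (r, q + 1)] :: pvAuxA (r + 1) (q + 2) n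

theorem pvFoldA (l : List Int) : ∀ (r q : Int) (acc : List (List (Int × Int))),
    (l.foldl
      (fun (st : Int × Int × List (List (Int × Int))) _ =>
        if PySem.Int.mod st.1 2 = 0 then
          (st.1 - 1, st.2.1 + 1,
            st.2.2 ++ [PySem.Set.ofList [(st.1, st.2.1), (st.1 - 1, st.2.1), (st.1, st.2.1 + 1)]])
        else
          (st.1 + 1, st.2.1 + 2,
            st.2.2 ++ [PySem.Set.ofList [(st.1, st.2.1), (st.1 + 1, st.2.1 + 1), (st.1, st.2.1 + 1)]]))
      (r, q, acc)).2.2 = acc ++ pvAuxA r q l.length := by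
  induction l with
  | nil => intro r q acc; simp [pvAuxA]
  | cons x xs ih =>
    intro r q acc
    simp only [List.foldl_cons, List.length_cons]
    by_cases h : PySem.Int.mod r 2 = 0
    · rw [if_pos h, ih]
      simp only [pvAuxA, if_pos h, List.append_assoc, List.singleton_append]
    · rw [if_neg h, ih]
      simp only [pvAuxA, if_neg h, List.append_assoc, List.singleton_append]

-- the shift law: advancing A's state by one step shifts B's index formula by one
theorem pvPos_shift (r q : Int) (k : Nat) :
    pvPos r q (PySem.Int.mod r 2 == 0) ((k : Int) + 1) =
      if PySem.Int.mod r 2 = 0 then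
        pvPos (r - 1) (q + 1) (PySem.Int.mod (r - 1) 2 == 0) (k : Int)
      else
        pvPos (r + 1) (q + 2) (PySem.Int.mod (r + 1) 2 == 0) (k : Int) := by
  have h2 : (k : Int) % 2 = 0 ∨ (k : Int) % 2 = 1 := by omega
  unfold pvPos
  simp only [pvMod2, pvFdiv2, beq_iff_eq]
  rcases h2 with hk | hk <;>
    rcases Int.emod_two_eq_zero_or_one r with hr | hr <;>
    · have h1 : ((k : Int) + 1) % 2 = 1 - (k : Int) % 2 := by omega
      have hrm : (r - 1) % 2 = 1 - r % 2 := by omega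
      have hrp : (r + 1) % 2 = 1 - r % 2 := by omega
      simp only [h1, hk, hr, hrm, hrp]
      norm_num [Prod.ext_iff]
      all_goals omega

theorem pvAuxA_eq (N : Nat) : ∀ r q : Int,
    pvAuxA r q N = (List.range N).map (fun k : Nat =>
      pvTile (pvPos r q (PySem.Int.mod r 2 == 0) ((k : Nat) : Int)).1
             (pvPos r q (PySem.Int.mod r 2 == 0) ((k : Nat) : Int)).2) := by
  induction N with
  | zero => intro r q; simp [pvAuxA]
  | succ n ih =>
    intro r q
    rw [List.range_succ_eq_map, List.map_cons, List.map_map]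
    have h0 : pvPos r q (PySem.Int.mod r 2 == 0) ((0 : Nat) : Int) = (r, q) := by
      simp [pvPos]
    by_cases h : PySem.Int.mod r 2 = 0
    · simp only [pvAuxA, if_pos h]
      congr 1
      · rw [h0]; unfold pvTile; rw [if_pos h]
      · rw [ih]
        refine List.map_congr_left (fun k _ => ?_)
        have hs := pvPos_shift r q k
        rw [if_pos h] at hs
        simp only [Function.comp_apply, Nat.succ_eq_add_one, Nat.cast_add, Nat.cast_one]
        rw [hs]
    · simp only [pvAuxA, if_neg h]
      congr 1
      · rw [h0]; unfold pvTile; rw [if_neg h]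
      · rw [ih]
        refine List.map_congr_left (fun k _ => ?_)
        have hs := pvPos_shift r q k
        rw [if_neg h] at hs
        simp only [Function.comp_apply, Nat.succ_eq_add_one, Nat.cast_add, Nat.cast_one]
        rw [hs]

-- ===== VERDICT (by name: the statement is the Claim_ definition above) =====
theorem compute_level_pyramid_py_spec : Claim_equal_compute_level_pyramid_py := by
  intro lh n _
  unfold Spec_compute_level_pyramid_py compute_level_pyramid_py compute_level_pyramid_py_alt
  rw [pvFoldA, PySem.List.pyRange_one 0 n]
  simp only [List.length_map, List.length_range, List.nil_append, Int.sub_zero, List.map_map]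
  rw [pvAuxA_eq]
  refine List.map_congr_left (fun k _ => ?_)
  simp
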